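-- pv_equiv track=rewrite | github.com/dphillips95/pPIC | tools/plot_logs.py | expand_values
-- ===== SOURCE A (Python) =====
-- def expand_values(vmin, vmax, locations):
--    # Expand vmin and vmax (away from each other) to the first match in list of acceptable values locations
--    # Return vmin or vmax if smaller/larger than list
--    try:
--       new_min = next(x for x in sorted(locations, reverse = True) if x <= vmin)
--    except StopIteration:
--       new_min = vmin
--    try:
--       new_max = next(x for x in sorted(locations) if x >= vmax)
--    except StopIteration:
--       new_max = vmax
--
--    return new_min,new_max
-- ===== SOURCE B (Python) =====
-- def expand_values(vmin, vmax, locations):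
--     # One pass, no sorting: track the largest location <= vmin and the smallest >= vmax.
--     lo = None
--     hi = None
--     for x in locations:
--         if x <= vmin and (lo is None or lo < x):
--             lo = x
--         if x >= vmax and (hi is None or x < hi):
--             hi = x
--     return (vmin if lo is None else lo, vmax if hi is None else hi)
-- ===== Notes on version B (the rewrite author's own statement) =====
-- stated objective: faster
-- what changed: Replaced the two sorts plus linear scans by a single unsorted pass that tracks the largest location <= vmin and the smallest location >= vmax.
import Mathlib
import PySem

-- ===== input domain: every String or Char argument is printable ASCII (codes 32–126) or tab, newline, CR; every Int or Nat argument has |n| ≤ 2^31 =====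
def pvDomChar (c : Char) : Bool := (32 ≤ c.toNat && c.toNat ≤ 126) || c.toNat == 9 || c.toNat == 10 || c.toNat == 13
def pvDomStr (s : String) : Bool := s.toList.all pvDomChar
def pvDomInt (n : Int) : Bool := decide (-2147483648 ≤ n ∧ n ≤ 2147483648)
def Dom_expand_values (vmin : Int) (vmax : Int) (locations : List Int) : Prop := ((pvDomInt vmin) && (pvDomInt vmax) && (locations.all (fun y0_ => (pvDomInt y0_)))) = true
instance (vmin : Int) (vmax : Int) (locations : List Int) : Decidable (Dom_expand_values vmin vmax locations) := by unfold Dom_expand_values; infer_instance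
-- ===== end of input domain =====

-- B replaces A's two sorts + linear scans by one unsorted pass keeping the best candidates (objective: faster).

-- ===== PORT A =====
-- next(x for x in sorted(locations, reverse=True) if x <= vmin), StopIteration → vmin; symmetric for vmax
def expand_values (vmin : Int) (vmax : Int) (locations : List Int) : Int × Int :=
  let new_min :=
    match (PySem.List.sorted locations (fun x => x) true).find? (fun x => decide (x ≤ vmin)) with
    | some x => x
    | none => vmin
  let new_max :=
    match (PySem.List.sorted locations (fun x => x) false).find? (fun x => decide (vmax ≤ x)) with
    | some x => x
    | none => vmax
  (new_min, new_max)

-- ===== PORT B =====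
-- single loop over locations carrying (lo, hi) as Options, then the fallbacks
def expand_values_alt (vmin : Int) (vmax : Int) (locations : List Int) : Int × Int :=
  let st := locations.foldl
    (fun (p : Option Int × Option Int) x =>
      ( if decide (x ≤ vmin) && (match p.1 with | none => true | some lo => decide (lo < x)) then some x else p.1,
        if decide (vmax ≤ x) && (match p.2 with | none => true | some hi => decide (x < hi)) then some x else p.2))
    (none, none)
  (match st.1 with | none => vmin | some lo => lo,
   match st.2 with | none => vmax | some hi => hi)

-- ===== PRECONDITION & SPEC =====
def Spec_expand_values (vmin : Int) (vmax : Int) (locations : List Int) (out : Int × Int) : Prop := out = expand_values_alt vmin vmax locations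
instance (vmin : Int) (vmax : Int) (locations : List Int) (out : Int × Int) : Decidable (Spec_expand_values vmin vmax locations out) := by unfold Spec_expand_values; infer_instance

-- ===== CLAIM (what is proved, stated in full; the proofs are below) =====
def Claim_equal_expand_values : Prop := ∀ (vmin : Int) (vmax : Int) (locations : List Int), Dom_expand_values vmin vmax locations → Spec_expand_values vmin vmax locations (expand_values vmin vmax locations)

-- ===== LEMMAS AND PROOFS =====

-- running max / min over an Option accumulator, the common value both sides compute
def omaxStep (a : Option Int) (x : Int) : Option Int :=
  some (match a with | none => x | some m => max m x)
def ominStep (a : Option Int) (x : Int) : Option Int :=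
  some (match a with | none => x | some m => min m x)

theorem foldl_pair_split (f g : Option Int → Int → Option Int) (l : List Int) (a b : Option Int) :
    l.foldl (fun (p : Option Int × Option Int) x => (f p.1 x, g p.2 x)) (a, b)
      = (l.foldl f a, l.foldl g b) := by
  induction l generalizing a b with
  | nil => rfl
  | cons x t ih => simpa using ih (f a x) (g b x)

theorem step_lo (vmin x : Int) (a : Option Int) (h : x ≤ vmin) :
    (if decide (x ≤ vmin) && (match a with | none => true | some lo => decide (lo < x)) then some x else a)
      = omaxStep a x := by
  cases a with
  | none => simp [omaxStep, h]
  | some m =>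
    by_cases hm : m < x
    · simp [omaxStep, h, hm, max_eq_right hm.le]
    · simp [omaxStep, h, hm, max_eq_left (by omega : x ≤ m)]

theorem step_hi (vmax x : Int) (a : Option Int) (h : vmax ≤ x) :
    (if decide (vmax ≤ x) && (match a with | none => true | some hi => decide (x < hi)) then some x else a)
      = ominStep a x := by
  cases a with
  | none => simp [ominStep, h]
  | some m =>
    by_cases hm : x < m
    · simp [ominStep, h, hm, min_eq_right hm.le]
    · simp [ominStep, h, hm, min_eq_left (by omega : m ≤ x)]

theorem lo_fold_eq (vmin : Int) (l : List Int) (a : Option Int) :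
    l.foldl (fun a x => if decide (x ≤ vmin) && (match a with | none => true | some lo => decide (lo < x)) then some x else a) a
      = (l.filter (fun x => decide (x ≤ vmin))).foldl omaxStep a := by
  induction l generalizing a with
  | nil => rfl
  | cons x t ih =>
    by_cases h : x ≤ vmin
    · rw [List.foldl_cons, step_lo vmin x a h, ih,
        List.filter_cons_of_pos (by simp [h]), List.foldl_cons]
    · rw [List.foldl_cons]
      simp only [h, decide_false, Bool.false_and, if_neg Bool.false_ne_true]
      rw [ih, List.filter_cons_of_neg (by simp [h])]

theorem hi_fold_eq (vmax : Int) (l : List Int) (a : Option Int) :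
    l.foldl (fun a x => if decide (vmax ≤ x) && (match a with | none => true | some hi => decide (x < hi)) then some x else a) a
      = (l.filter (fun x => decide (vmax ≤ x))).foldl ominStep a := by
  induction l generalizing a with
  | nil => rfl
  | cons x t ih =>
    by_cases h : vmax ≤ x
    · rw [List.foldl_cons, step_hi vmax x a h, ih,
        List.filter_cons_of_pos (by simp [h]), List.foldl_cons]
    · rw [List.foldl_cons]
      simp only [h, decide_false, Bool.false_and, if_neg Bool.false_ne_true]
      rw [ih, List.filter_cons_of_neg (by simp [h])]

theorem omax_stay (m : Int) (t : List Int) (h : ∀ y ∈ t, y ≤ m) :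
    t.foldl omaxStep (some m) = some m := by
  induction t with
  | nil => rfl
  | cons y t ih =>
    have hy : y ≤ m := h y (by simp)
    simp only [List.foldl_cons, omaxStep, max_eq_left hy]
    exact ih (fun z hz => h z (by simp [hz]))

theorem omin_stay (m : Int) (t : List Int) (h : ∀ y ∈ t, m ≤ y) :
    t.foldl ominStep (some m) = some m := by
  induction t with
  | nil => rfl
  | cons y t ih =>
    have hy : m ≤ y := h y (by simp)
    simp only [List.foldl_cons, ominStep, min_eq_left hy]
    exact ih (fun z hz => h z (by simp [hz]))

theorem find_desc_eq_omax (v : Int) (s : List Int) (hp : s.Pairwise (fun a b => b ≤ a)) :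
    s.find? (fun x => decide (x ≤ v))
      = (s.filter (fun x => decide (x ≤ v))).foldl omaxStep none := by
  induction s with
  | nil => rfl
  | cons m t ih =>
    rcases List.pairwise_cons.mp hp with ⟨hhead, htail⟩
    by_cases h : m ≤ v
    · rw [List.find?_cons_of_pos (by simp [h]), List.filter_cons_of_pos (by simp [h]),
        List.foldl_cons]
      exact (omax_stay m _ (fun y hy => hhead y (List.mem_of_mem_filter hy))).symm
    · rw [List.find?_cons_of_neg (by simp [h]), List.filter_cons_of_neg (by simp [h]), ih htail]

theorem find_asc_eq_omin (v : Int) (s : List Int) (hp : s.Pairwise (fun a b => a ≤ b)) :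
    s.find? (fun x => decide (v ≤ x))
      = (s.filter (fun x => decide (v ≤ x))).foldl ominStep none := by
  induction s with
  | nil => rfl
  | cons m t ih =>
    rcases List.pairwise_cons.mp hp with ⟨hhead, htail⟩
    by_cases h : v ≤ m
    · rw [List.find?_cons_of_pos (by simp [h]), List.filter_cons_of_pos (by simp [h]),
        List.foldl_cons]
      exact (omin_stay m _ (fun y hy => hhead y (List.mem_of_mem_filter hy))).symm
    · rw [List.find?_cons_of_neg (by simp [h]), List.filter_cons_of_neg (by simp [h]), ih htail]

theorem omax_perm {l₁ l₂ : List Int} (h : l₁.Perm l₂) (a : Option Int) :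
    l₁.foldl omaxStep a = l₂.foldl omaxStep a := by
  haveI : RightCommutative omaxStep := ⟨by
    intro b x y
    cases b <;> simp [omaxStep, max_assoc, max_comm x y]⟩
  exact h.foldl_eq a

theorem omin_perm {l₁ l₂ : List Int} (h : l₁.Perm l₂) (a : Option Int) :
    l₁.foldl ominStep a = l₂.foldl ominStep a := by
  haveI : RightCommutative ominStep := ⟨by
    intro b x y
    cases b <;> simp [ominStep, min_assoc, min_comm x y]⟩
  exact h.foldl_eq a

-- ===== VERDICT (by name: the statement is the Claim_ definition above) =====
theorem expand_values_spec : Claim_equal_expand_values := by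
  intro vmin vmax l _
  unfold Spec_expand_values
  simp only [expand_values, expand_values_alt]
  rw [foldl_pair_split
        (fun a x => if decide (x ≤ vmin) && (match a with | none => true | some lo => decide (lo < x)) then some x else a)
        (fun a x => if decide (vmax ≤ x) && (match a with | none => true | some hi => decide (x < hi)) then some x else a)
        l none none,
      lo_fold_eq, hi_fold_eq]
  rw [find_desc_eq_omax vmin _ (by simpa using PySem.List.sorted_pairwise_rev l (fun x => x)),
      find_asc_eq_omin vmax _ (by simpa using PySem.List.sorted_pairwise l (fun x => x))]
  rw [omax_perm ((PySem.List.sorted_perm l (fun x => x) true).filter _) none,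
      omin_perm ((PySem.List.sorted_perm l (fun x => x) false).filter _) none]
  cases List.foldl omaxStep none (List.filter (fun x => decide (x ≤ vmin)) l) <;>
    cases List.foldl ominStep none (List.filter (fun x => decide (vmax ≤ x)) l) <;> rfl
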